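-- pv_equiv track=rewrite | github.com/ArminKleinert/oop_tasks | task4/task.py | shellsort_ops
-- ===== SOURCE A (Python) =====
-- def jump_insert_sort_ops(A, start, step):
--     cmp_ops = 0
--     for i in range(start+step, len(A), step):
--         value = A[i]
--         j = i
--         while  j >= step  and  A[j-step] > value:
--             cmp_ops += 2
--             A[j] = A[j-step]
--             j = j - step
--         A[j] = value
--     return cmp_ops
--
-- def shellsort_ops(A):
--     cmp_ops = 0
--     seg_size = len(A)//2
--     while seg_size > 0:
--         cmp_ops += 1
--         for start_i in range(seg_size):
--             cmp_ops += jump_insert_sort_ops(A, start_i, seg_size)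
--         seg_size = seg_size // 2
--     return cmp_ops
-- ===== SOURCE B (Python) =====
-- def shellsort_ops(A):
--     cmp_ops = 0
--     seg = len(A) // 2
--     while seg > 0:
--         cmp_ops += 1
--         for start in range(seg):
--             sub = A[start::seg]
--             pref = []
--             for v in sub:
--                 lo, hi = 0, len(pref)
--                 while lo < hi:
--                     mid = (lo + hi) // 2
--                     if pref[mid] <= v:
--                         lo = mid + 1
--                     else:
--                         hi = mid
--                 cmp_ops += 2 * (len(pref) - lo)
--                 pref.insert(lo, v)
--             A[start::seg] = pref
--         seg //= 2
--     return cmp_ops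
-- ===== Notes on version B (the rewrite author's own statement) =====
-- stated objective: alternative
-- what changed: Replaces the in-place gapped shifting insertion sort with: extract each gapped subsequence by slicing, build its sorted order by hand-rolled binary search plus list insertion (counting 2*(elements greater than the inserted value) per element, which equals A's shift count), and splice the sorted subsequence back.
import Mathlib
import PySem

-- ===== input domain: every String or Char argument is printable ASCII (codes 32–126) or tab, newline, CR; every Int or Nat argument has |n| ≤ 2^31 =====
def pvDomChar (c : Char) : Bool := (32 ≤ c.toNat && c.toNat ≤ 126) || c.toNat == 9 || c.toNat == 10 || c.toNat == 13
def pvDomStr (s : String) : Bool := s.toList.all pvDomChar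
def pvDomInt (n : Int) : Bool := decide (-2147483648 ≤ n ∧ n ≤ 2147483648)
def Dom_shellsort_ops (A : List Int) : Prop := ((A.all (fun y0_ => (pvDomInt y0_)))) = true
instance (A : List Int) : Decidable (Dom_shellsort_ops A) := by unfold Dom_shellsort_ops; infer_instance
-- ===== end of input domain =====

-- B replaces A's in-place gapped shifting insertion sort by gather / binary-insertion / scatter
-- on each gapped subsequence (objective: alternative algorithm, same results).
-- Both Pythons sort the argument list in place identically; the equivalence proved here is about the return value.

-- ===== PORT A =====
-- Every loop below is ported as STRUCTURAL recursion on an explicit fuel argument, a pure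
-- totality guard: each call site passes fuel exceeding the loop's iteration count, and when
-- fuel reaches 0 the function returns exactly the value of the loop's normal exit branch,
-- so each port computes its Python's value on every input.

-- the inner while loop of jump_insert_sort_ops: state (A, j, cmp_ops).
-- All Python indexing here is in range (j ≥ step guard), so A[x] is ported as List.getD x 0 (exact);
-- '0 < step' is a totality guard only: every call site has step ≥ 1.
def pvShift (fuel : Nat) (value : Int) (step : Nat) (A : List Int) (j : Nat) (c : Int) :
    List Int × Nat × Int :=
  match fuel with
  | 0 => (A, j, c)
  | fuel + 1 =>
    if 0 < step ∧ step ≤ j ∧ A.getD (j - step) 0 > value then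
      pvShift fuel value step (A.set j (A.getD (j - step) 0)) (j - step) (c + 2)
    else (A, j, c)

-- the for loop 'for i in range(start+step, len(A), step)' (step ≥ 1), ported as increasing
-- recursion on i (exact); the while loop makes at most i/step ≤ i shifts, so fuel i is enough
def pvJumpFor (fuel : Nat) (n step : Nat) (A : List Int) (i : Nat) (c : Int) : List Int × Int :=
  match fuel with
  | 0 => (A, c)
  | fuel + 1 =>
    if 0 < step ∧ i < n then
      let value := A.getD i 0
      let r := pvShift i value step A i c
      pvJumpFor fuel n step (r.1.set r.2.1 value) (i + step) r.2.2
    else (A, c)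

def pvJump (A : List Int) (start step : Nat) : List Int × Int :=
  pvJumpFor A.length A.length step A (start + step) 0

-- 'for start_i in range(seg_size)': exactly seg iterations
def pvStartLoop (fuel : Nat) (seg : Nat) (A : List Int) (s : Nat) (c : Int) : List Int × Int :=
  match fuel with
  | 0 => (A, c)
  | fuel + 1 =>
    if s < seg then
      let r := pvJump A s seg
      pvStartLoop fuel seg r.1 (s + 1) (c + r.2)
    else (A, c)

-- 'while seg_size > 0': at most seg halvings
def pvShellLoop (fuel : Nat) (A : List Int) (seg : Nat) (c : Int) : Int :=
  match fuel with
  | 0 => c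
  | fuel + 1 =>
    if 0 < seg then
      let r := pvStartLoop seg seg A 0 (c + 1)
      pvShellLoop fuel r.1 (seg / 2) r.2
    else c

def shellsort_ops (A : List Int) : Int := pvShellLoop (A.length / 2 + 1) A (A.length / 2) 0

-- ===== PORT B =====
-- A[start::step] for 0 ≤ start, 0 < step, ported by hand (exact; it yields at most
-- A.length elements, so fuel A.length is enough); '0 < step' is a totality guard only
def pvGatherF (fuel : Nat) (A : List Int) (i step : Nat) : List Int :=
  match fuel with
  | 0 => []
  | fuel + 1 =>
    if 0 < step ∧ i < A.length then A.getD i 0 :: pvGatherF fuel A (i + step) step else []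

def pvGather (A : List Int) (i step : Nat) : List Int := pvGatherF A.length A i step

-- the slice assignment A[start::step] = vs (len vs = len of the slice at every call), ported by hand (exact)
def pvScatter (A : List Int) (i step : Nat) : List Int → List Int
  | [] => A
  | v :: vs => pvScatter (A.set i v) (i + step) step vs

-- the hand-rolled bisect_right while loop of B; pref[mid] has 0 ≤ mid < len(pref), ported as
-- getD (exact); the interval shrinks every iteration, so fuel hi - lo (= len(pref)) is enough
def pvBinSearch (fuel : Nat) (pref : List Int) (v : Int) (lo hi : Nat) : Nat :=
  match fuel with
  | 0 => lo
  | fuel + 1 =>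
    if lo < hi then
      let mid := (lo + hi) / 2
      if pref.getD mid 0 ≤ v then pvBinSearch fuel pref v (mid + 1) hi
      else pvBinSearch fuel pref v lo mid
    else lo

-- 'for v in sub' building pref; pref.insert(lo, v) with 0 ≤ lo ≤ len(pref) is insertIdx (exact)
def pvPrefLoop (pref : List Int) (sub : List Int) (c : Int) : List Int × Int :=
  match sub with
  | [] => (pref, c)
  | v :: vs =>
    let lo := pvBinSearch pref.length pref v 0 pref.length
    pvPrefLoop (pref.insertIdx lo v) vs (c + 2 * ((pref.length : Int) - (lo : Int)))

-- 'for start in range(seg)': exactly seg iterations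
def pvPassB (fuel : Nat) (seg : Nat) (A : List Int) (s : Nat) (c : Int) : List Int × Int :=
  match fuel with
  | 0 => (A, c)
  | fuel + 1 =>
    if s < seg then
      let sub := pvGather A s seg
      let r := pvPrefLoop [] sub c
      pvPassB fuel seg (pvScatter A s seg r.1) (s + 1) r.2
    else (A, c)

def pvShellLoopB (fuel : Nat) (A : List Int) (seg : Nat) (c : Int) : Int :=
  match fuel with
  | 0 => c
  | fuel + 1 =>
    if 0 < seg then
      let r := pvPassB seg seg A 0 (c + 1)
      pvShellLoopB fuel r.1 (seg / 2) r.2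
    else c

def shellsort_ops_alt (A : List Int) : Int := pvShellLoopB (A.length / 2 + 1) A (A.length / 2) 0

-- ===== PRECONDITION & SPEC =====
def Spec_shellsort_ops (A : List Int) (out : Int) : Prop := out = shellsort_ops_alt A
instance (A : List Int) (out : Int) : Decidable (Spec_shellsort_ops A out) := by unfold Spec_shellsort_ops; infer_instance

-- ===== CLAIM (what is proved, stated in full; the proofs are below) =====
def Claim_equal_shellsort_ops : Prop := ∀ (A : List Int), Dom_shellsort_ops A → Spec_shellsort_ops A (shellsort_ops A)

-- ===== LEMMAS AND PROOFS =====

-- number of elements ≤ v (what B's binary search computes on a sorted prefix)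
def pvTle (v : Int) (p : List Int) : Nat := p.countP (fun w => decide (w ≤ v))

-- insertion of v into a sorted prefix, in canonical take/drop form
def pvInsC (v : Int) (p : List Int) : List Int := p.take (pvTle v p) ++ v :: p.drop (pvTle v p)

-- the common list-level model of one pass over one gapped subsequence
def pvFold (p : List Int) (rest : List Int) (c : Int) : List Int × Int :=
  match rest with
  | [] => (p, c)
  | v :: vs => pvFold (pvInsC v p) vs (c + 2 * ((p.length : Int) - (pvTle v p : Int)))

theorem pvTle_le_length (v : Int) (p : List Int) : pvTle v p ≤ p.length :=
  List.countP_le_length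

theorem pvTle_nil (v : Int) : pvTle v [] = 0 := rfl

theorem pvInsC_nil (v : Int) : pvInsC v [] = [v] := rfl

theorem pvInsC_length (v : Int) (p : List Int) : (pvInsC v p).length = p.length + 1 := by
  have h := pvTle_le_length v p
  simp only [pvInsC, List.length_append, List.length_cons, List.length_take, List.length_drop]
  omega

theorem pvInsC_ne_nil (v : Int) (p : List Int) : pvInsC v p ≠ [] := by
  intro h
  have := pvInsC_length v p
  rw [h] at this
  simp at this

theorem pvTle_concat_gt (v x : Int) (p : List Int) (h : v < x) :
    pvTle v (p ++ [x]) = pvTle v p := by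
  simp [pvTle, List.countP_append]
  omega

theorem pvTle_of_all_le (v : Int) (p : List Int) (h : ∀ x ∈ p, x ≤ v) :
    pvTle v p = p.length := by
  unfold pvTle
  rw [List.countP_eq_length]
  intro a ha
  simpa using h a ha

theorem pvInsC_concat_gt (v x : Int) (p : List Int) (h : v < x) :
    pvInsC v (p ++ [x]) = pvInsC v p ++ [x] := by
  have ht := pvTle_le_length v p
  unfold pvInsC
  rw [pvTle_concat_gt v x p h, List.take_append_of_le_length ht,
      List.drop_append_of_le_length ht]
  simp

theorem pvInsC_of_all_le (v : Int) (p : List Int) (h : ∀ x ∈ p, x ≤ v) :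
    pvInsC v p = p ++ [v] := by
  unfold pvInsC
  rw [pvTle_of_all_le v p h]
  simp

theorem pvSorted_take_le (v : Int) (p : List Int) (hs : p.Pairwise (· ≤ ·)) :
    ∀ x ∈ p.take (pvTle v p), x ≤ v := by
  induction p with
  | nil => simp [pvTle]
  | cons a as ih =>
    rcases List.pairwise_cons.mp hs with ⟨ha, has⟩
    by_cases hav : a ≤ v
    · have : pvTle v (a :: as) = pvTle v as + 1 := by simp [pvTle, hav]
      rw [this]
      intro x hx
      rcases (by simpa using hx : x = a ∨ x ∈ as.take (pvTle v as)) with h1 | h2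
      · exact h1 ▸ hav
      · exact ih has x h2
    · have : pvTle v (a :: as) = 0 := by
        unfold pvTle
        simp only [List.countP_cons]
        have h2 : as.countP (fun w => decide (w ≤ v)) = 0 := by
          rw [List.countP_eq_zero]
          intro b hb
          simp only [decide_eq_true_eq]
          exact fun hbv => hav (le_trans (ha b hb) hbv)
        simp [hav, h2]
      rw [this]
      simp

theorem pvSorted_drop_gt (v : Int) (p : List Int) (hs : p.Pairwise (· ≤ ·)) :
    ∀ x ∈ p.drop (pvTle v p), v < x := by
  induction p with
  | nil => simp [pvTle]
  | cons a as ih =>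
    rcases List.pairwise_cons.mp hs with ⟨ha, has⟩
    by_cases hav : a ≤ v
    · have : pvTle v (a :: as) = pvTle v as + 1 := by simp [pvTle, hav]
      rw [this]
      intro x hx
      exact ih has x (by simpa using hx)
    · have h0 : pvTle v (a :: as) = 0 := by
        unfold pvTle
        simp only [List.countP_cons]
        have h2 : as.countP (fun w => decide (w ≤ v)) = 0 := by
          rw [List.countP_eq_zero]
          intro b hb
          simp only [decide_eq_true_eq]
          exact fun hbv => hav (le_trans (ha b hb) hbv)
        simp [hav, h2]
      rw [h0]
      intro x hx
      rcases (by simpa using hx : x = a ∨ x ∈ as) with h1 | h2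
      · subst h1; exact lt_of_not_ge hav
      · exact lt_of_lt_of_le (lt_of_not_ge hav) (ha x h2)

theorem pvInsC_sorted (v : Int) (p : List Int) (hs : p.Pairwise (· ≤ ·)) :
    (pvInsC v p).Pairwise (· ≤ ·) := by
  unfold pvInsC
  rw [List.pairwise_append]
  refine ⟨hs.sublist (List.take_sublist _ _), ?_, ?_⟩
  · refine List.pairwise_cons.mpr ⟨?_, hs.sublist (List.drop_sublist _ _)⟩
    intro b hb
    exact le_of_lt (pvSorted_drop_gt v p hs b hb)
  · intro a ha b hb
    have hav : a ≤ v := pvSorted_take_le v p hs a ha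
    rcases List.mem_cons.mp hb with h1 | h2
    · exact h1 ▸ hav
    · exact le_trans hav (le_of_lt (pvSorted_drop_gt v p hs b h2))

theorem pvFold_offset (rest : List Int) : ∀ (p : List Int) (c : Int),
    pvFold p rest c = ((pvFold p rest 0).1, c + (pvFold p rest 0).2) := by
  induction rest with
  | nil => intro p c; simp [pvFold]
  | cons v vs ih =>
    intro p c
    simp only [pvFold]
    rw [ih (pvInsC v p) (c + 2 * ((p.length : Int) - (pvTle v p : Int))),
        ih (pvInsC v p) (0 + 2 * ((p.length : Int) - (pvTle v p : Int)))]
    simp only [Prod.mk.injEq]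
    refine ⟨trivial, by ring⟩

-- ---- scatter / gather lemmas ----

theorem pvSet_scatter_comm (step : Nat) : ∀ (L A : List Int) (i j : Nat) (v : Int), j < i →
    (pvScatter A i step L).set j v = pvScatter (A.set j v) i step L := by
  intro L
  induction L with
  | nil => intro A i j v _; rfl
  | cons w ws ih =>
    intro A i j v hj
    simp only [pvScatter]
    rw [ih (A.set i w) (i + step) j v (by omega), List.set_comm _ _ (by omega)]

theorem pvScatter_set (step : Nat) (hstep : 0 < step) : ∀ (L : List Int) (m : Nat) (A : List Int) (i : Nat) (v : Int),
    m < L.length →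
    (pvScatter A i step L).set (i + m * step) v = pvScatter A i step (L.set m v) := by
  intro L
  induction L with
  | nil => intro m A i v hm; simp at hm
  | cons w ws ih =>
    intro m A i v hm
    cases m with
    | zero =>
      simp only [pvScatter, Nat.zero_mul, Nat.add_zero, List.set_cons_zero]
      rw [pvSet_scatter_comm step ws (A.set i w) (i + step) i v (by omega), List.set_set]
    | succ m' =>
      have harith : i + (m' + 1) * step = (i + step) + m' * step := by
        rw [Nat.succ_mul]; omega
      simp only [pvScatter, List.set_cons_succ]
      rw [harith, ih m' (A.set i w) (i + step) v (by simpa using hm)]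

theorem pvScatter_set0 (step : Nat) (hstep : 0 < step) (L A : List Int) (i : Nat) (v : Int)
    (h : 0 < L.length) :
    (pvScatter A i step L).set i v = pvScatter A i step (L.set 0 v) := by
  have := pvScatter_set step hstep L 0 A i v h
  simpa using this

theorem pvGetD_scatter_lt (step : Nat) : ∀ (L A : List Int) (i j : Nat) (d : Int), j < i →
    (pvScatter A i step L).getD j d = A.getD j d := by
  intro L
  induction L with
  | nil => intro A i j d _; rfl
  | cons w ws ih =>
    intro A i j d hj
    simp only [pvScatter]
    rw [ih (A.set i w) (i + step) j d (by omega)]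
    simp [List.getD_eq_getElem?_getD, List.getElem?_set_ne (by omega : i ≠ j)]

theorem pvScatter_getD (step : Nat) (hstep : 0 < step) : ∀ (L : List Int) (m : Nat) (A : List Int) (i : Nat) (d : Int),
    m < L.length → i + m * step < A.length →
    (pvScatter A i step L).getD (i + m * step) d = L.getD m d := by
  intro L
  induction L with
  | nil => intro m A i d hm; simp at hm
  | cons w ws ih =>
    intro m A i d hm hpos
    cases m with
    | zero =>
      simp only [pvScatter, Nat.zero_mul, Nat.add_zero, List.getD_cons_zero]
      rw [pvGetD_scatter_lt step ws (A.set i w) (i + step) i d (by omega)]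
      rw [List.getD_eq_getElem _ _ (by simpa using hpos)]
      exact List.getElem_set_self _
    | succ m' =>
      have harith : i + (m' + 1) * step = (i + step) + m' * step := by
        rw [Nat.succ_mul]; omega
      simp only [pvScatter, List.getD_cons_succ]
      rw [harith, ih m' (A.set i w) (i + step) d (by simpa using hm) (by simpa using harith ▸ hpos)]

theorem pvSet_getD_self (A : List Int) (i : Nat) (h : i < A.length) :
    A.set i (A.getD i 0) = A := by
  rw [List.getD_eq_getElem _ _ h]
  exact List.set_getElem_self h

-- fuel is sufficient whenever A.length - i ≤ fuel (each gathered element advances i by step ≥ 1)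
theorem pvGatherF_scatter (A : List Int) (step : Nat) :
    ∀ (f i : Nat), A.length - i ≤ f →
    pvScatter A i step (pvGatherF f A i step) = A := by
  intro f
  induction f with
  | zero => intro i _; rfl
  | succ f ih =>
    intro i hf
    by_cases h : 0 < step ∧ i < A.length
    · simp only [pvGatherF, if_pos h, pvScatter]
      rw [pvSet_getD_self A i h.2]
      exact ih (i + step) (by omega)
    · simp only [pvGatherF, if_neg h, pvScatter]

theorem pvGatherF_pos (A : List Int) (step : Nat) :
    ∀ (f i m : Nat), m < (pvGatherF f A i step).length → i + m * step < A.length := by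
  intro f
  induction f with
  | zero => intro i m hm; simp [pvGatherF] at hm
  | succ f ih =>
    intro i m hm
    by_cases h : 0 < step ∧ i < A.length
    · rw [pvGatherF, if_pos h] at hm
      cases m with
      | zero => simpa using h.2
      | succ m' =>
        have : (i + step) + m' * step < A.length := ih (i + step) m' (by simpa using hm)
        rw [Nat.succ_mul]; omega
    · rw [pvGatherF, if_neg h] at hm
      simp at hm

theorem pvGatherF_end (A : List Int) (step : Nat) (hstep : 0 < step) :
    ∀ (f i : Nat), A.length - i ≤ f →
    ¬ (i + (pvGatherF f A i step).length * step < A.length) := by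
  intro f
  induction f with
  | zero =>
    intro i hf
    simp only [pvGatherF, List.length_nil, Nat.zero_mul, Nat.add_zero]
    omega
  | succ f ih =>
    intro i hf
    by_cases h : 0 < step ∧ i < A.length
    · rw [pvGatherF, if_pos h]
      simp only [List.length_cons]
      rw [Nat.succ_mul]
      intro hc
      exact ih (i + step) (by omega) (by omega)
    · rw [pvGatherF, if_neg h]
      simp only [List.length_nil, Nat.zero_mul, Nat.add_zero]
      intro hc
      exact h ⟨hstep, hc⟩

theorem pvGatherF_le_fuel (A : List Int) (step : Nat) :
    ∀ (f i : Nat), (pvGatherF f A i step).length ≤ f := by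
  intro f
  induction f with
  | zero => intro i; simp [pvGatherF]
  | succ f ih =>
    intro i
    by_cases h : 0 < step ∧ i < A.length
    · rw [pvGatherF, if_pos h]
      simpa using ih (i + step)
    · rw [pvGatherF, if_neg h]
      simp

theorem pvGather_scatter (A : List Int) (i step : Nat) :
    pvScatter A i step (pvGather A i step) = A :=
  pvGatherF_scatter A step A.length i (by omega)

theorem pvGather_pos (A : List Int) (i step : Nat) :
    ∀ m, m < (pvGather A i step).length → i + m * step < A.length :=
  fun m hm => pvGatherF_pos A step A.length i m hm

theorem pvGather_end (A : List Int) (i step : Nat) (hstep : 0 < step) :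
    ¬ (i + (pvGather A i step).length * step < A.length) :=
  pvGatherF_end A step hstep A.length i (by omega)

theorem pvGather_le_length (A : List Int) (i step : Nat) :
    (pvGather A i step).length ≤ A.length :=
  pvGatherF_le_fuel A step A.length i

theorem pvGather_ne_nil (A : List Int) (i step : Nat) (hstep : 0 < step) (h : i < A.length) :
    pvGather A i step ≠ [] := by
  unfold pvGather
  cases hl : A.length with
  | zero => omega
  | succ n =>
    rw [pvGatherF, if_pos ⟨hstep, by omega⟩]
    simp

-- ---- binary search ----

theorem pvSorted_getD_mono (p : List Int) (hs : p.Pairwise (· ≤ ·)) (i j : Nat)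
    (hij : i ≤ j) (hj : j < p.length) : p.getD i 0 ≤ p.getD j 0 := by
  rcases Nat.eq_or_lt_of_le hij with h | h
  · subst h; exact le_refl _
  · rw [List.getD_eq_getElem _ _ (by omega), List.getD_eq_getElem _ _ hj]
    exact List.pairwise_iff_getElem.mp hs i j (by omega) hj h

theorem pvCountP_split (p : List Int) (P : Int → Bool) : ∀ (m : Nat), m ≤ p.length →
    (∀ i, i < m → P (p.getD i 0) = true) →
    (∀ i, m ≤ i → i < p.length → ¬ (P (p.getD i 0) = true)) →
    p.countP P = m := by
  induction p with
  | nil => intro m hm _ _; simp at hm ⊢; omega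
  | cons a as ih =>
    intro m hm h1 h2
    cases m with
    | zero =>
      have ha : ¬ (P a = true) := by simpa using h2 0 (by omega) (by simp)
      have : as.countP P = 0 := by
        rw [List.countP_eq_zero]
        intro b hb
        rcases List.mem_iff_getElem.mp hb with ⟨i, hi, rfl⟩
        have := h2 (i + 1) (by omega) (by simpa using hi)
        rwa [List.getD_cons_succ, List.getD_eq_getElem _ _ hi] at this
      simp [this, ha]
    | succ m' =>
      have ha : P a = true := by simpa using h1 0 (by omega)
      have : as.countP P = m' := by
        apply ih m' (by simpa using hm)
        · intro i hi
          have := h1 (i + 1) (by omega)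
          rwa [List.getD_cons_succ] at this
        · intro i hi hilen
          have := h2 (i + 1) (by omega) (by simpa using hilen)
          rwa [List.getD_cons_succ] at this
      simp [this, ha]

theorem pvBinSearch_go (p : List Int) (v : Int) (hs : p.Pairwise (· ≤ ·)) :
    ∀ (f lo hi : Nat), hi - lo ≤ f → lo ≤ hi → hi ≤ p.length →
    (∀ i, i < lo → p.getD i 0 ≤ v) →
    (∀ i, hi ≤ i → i < p.length → ¬ (p.getD i 0 ≤ v)) →
    pvBinSearch f p v lo hi = pvTle v p := by
  intro f
  induction f with
  | zero =>
    intro lo hi hd hlohi hhi h1 h2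
    have heq : lo = hi := by omega
    rw [pvBinSearch]
    subst heq
    symm
    apply pvCountP_split p _ lo hhi
    · intro i hi2; simpa using h1 i hi2
    · intro i hi2 hlen; simpa using h2 i hi2 hlen
  | succ f ih =>
    intro lo hi hd hlohi hhi h1 h2
    by_cases hlh : lo < hi
    · rw [pvBinSearch]
      rw [if_pos hlh]
      by_cases hmid : p.getD ((lo + hi) / 2) 0 ≤ v
      · rw [if_pos hmid]
        apply ih ((lo + hi) / 2 + 1) hi (by omega) (by omega) hhi
        · intro i hi2
          exact le_trans (pvSorted_getD_mono p hs i ((lo + hi) / 2) (by omega) (by omega)) hmid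
        · exact h2
      · rw [if_neg hmid]
        apply ih lo ((lo + hi) / 2) (by omega) (by omega) (by omega) h1
        · intro i hi2 hlen hc
          exact hmid (le_trans (pvSorted_getD_mono p hs ((lo + hi) / 2) i hi2 hlen) hc)
    · rw [pvBinSearch, if_neg hlh]
      have heq : lo = hi := by omega
      subst heq
      symm
      apply pvCountP_split p _ lo hhi
      · intro i hi2; simpa using h1 i hi2
      · intro i hi2 hlen; simpa using h2 i hi2 hlen

theorem pvBinSearch_count (p : List Int) (v : Int) (hs : p.Pairwise (· ≤ ·)) :
    pvBinSearch p.length p v 0 p.length = pvTle v p := by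
  apply pvBinSearch_go p v hs p.length 0 p.length (by omega) (by omega) (le_refl _)
  · intro i hi; omega
  · intro i hi hlen; omega

theorem pvInsertIdx_take_drop : ∀ (p : List Int) (n : Nat) (v : Int), n ≤ p.length →
    p.insertIdx n v = p.take n ++ v :: p.drop n := by
  intro p
  induction p with
  | nil =>
    intro n v hn
    have : n = 0 := by simpa using hn
    subst this
    simp
  | cons a as ih =>
    intro n v hn
    cases n with
    | zero => simp
    | succ n' =>
      simp only [List.insertIdx_succ_cons, List.take_succ_cons, List.drop_succ_cons,
        List.cons_append]
      rw [ih n' v (by simpa using hn)]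

theorem pvPrefLoop_eq_fold : ∀ (sub p : List Int) (c : Int), p.Pairwise (· ≤ ·) →
    pvPrefLoop p sub c = pvFold p sub c := by
  intro sub
  induction sub with
  | nil => intro p c _; rfl
  | cons v vs ih =>
    intro p c hp
    simp only [pvPrefLoop, pvFold]
    rw [pvBinSearch_count p v hp,
        pvInsertIdx_take_drop p (pvTle v p) v (pvTle_le_length v p)]
    exact ih (pvInsC v p) _ (pvInsC_sorted v p hp)

-- ---- simulation of A's shifting while loop ----

theorem pvGetD_append_mid (p : List Int) (x : Int) (t : List Int) (d : Int) :
    (p ++ x :: t).getD p.length d = x := by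
  rw [List.getD_append_right _ _ _ _ (le_refl _)]
  simp

-- the while loop makes p.length - pvTle v p ≤ p.length shifts, so any fuel ≥ p.length is enough
theorem pvShift_sim (A0 : List Int) (start step : Nat) (hstep : 0 < step) (hss : start < step) :
    ∀ (p : List Int) (f : Nat) (z : Int) (w : List Int) (c : Int) (v : Int),
    p.length ≤ f → p.Pairwise (· ≤ ·) →
    p.length + 1 + w.length = (pvGather A0 start step).length →
    (pvShift f v step (pvScatter A0 start step (p ++ z :: w)) (start + p.length * step) c).1.set
        (pvShift f v step (pvScatter A0 start step (p ++ z :: w)) (start + p.length * step) c).2.1 v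
      = pvScatter A0 start step (pvInsC v p ++ w) ∧
    (pvShift f v step (pvScatter A0 start step (p ++ z :: w)) (start + p.length * step) c).2.2
      = c + 2 * ((p.length : Int) - (pvTle v p : Int)) := by
  intro p
  induction p using List.reverseRecOn with
  | nil =>
    intro f z w c v _ _ hlen
    have hr : pvShift f v step (pvScatter A0 start step ([] ++ z :: w)) (start + 0 * step) c
        = (pvScatter A0 start step ([] ++ z :: w), start + 0 * step, c) := by
      cases f with
      | zero => rfl
      | succ f => rw [pvShift, if_neg (by simp; omega)]
    rw [List.length_nil, hr]
    simp only [List.nil_append, Nat.zero_mul, Nat.add_zero]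
    constructor
    · rw [pvScatter_set0 step hstep (z :: w) A0 start v (by simp)]
      simp [pvInsC_nil]
    · simp [pvTle_nil]
  | append_singleton p' x ihp =>
    intro f z w c v hf hp hlen
    rcases List.pairwise_append.mp hp with ⟨hp', _, hcross⟩
    have hax : ∀ a ∈ p', a ≤ x := fun a ha => hcross a ha x (by simp)
    have hposj : start + (p'.length + 1) * step < A0.length :=
      pvGather_pos A0 start step _ (by simp at hlen; omega)
    have hposj' : start + p'.length * step < A0.length :=
      pvGather_pos A0 start step _ (by simp at hlen; omega)
    have hlistlen : p'.length + 1 < (p' ++ [x] ++ z :: w).length := by simp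
    have harithj : start + (p' ++ [x]).length * step = start + (p'.length + 1) * step := by simp
    have harithsub : start + (p'.length + 1) * step - step = start + p'.length * step := by
      rw [Nat.succ_mul]; omega
    have hreadA : (pvScatter A0 start step (p' ++ [x] ++ z :: w)).getD
        (start + p'.length * step) 0 = x := by
      have h1 : (p' ++ [x] ++ z :: w).getD p'.length 0 = x := by
        rw [List.append_assoc, List.cons_append, pvGetD_append_mid]
      calc (pvScatter A0 start step (p' ++ [x] ++ z :: w)).getD (start + p'.length * step) 0
          = (p' ++ [x] ++ z :: w).getD p'.length 0 :=
            pvScatter_getD step hstep _ p'.length A0 start 0 (by simp) hposj'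
        _ = x := h1
    obtain ⟨f', rfl⟩ : ∃ f', f = f' + 1 := ⟨f - 1, by simp at hf; omega⟩
    by_cases hvx : x > v
    · -- shift x one slot to the right and continue
      rw [harithj, pvShift]
      rw [if_pos (by
        refine ⟨hstep, by rw [Nat.succ_mul]; omega, ?_⟩
        rw [harithsub, hreadA]; exact hvx)]
      simp only [harithsub, hreadA]
      have hset : (pvScatter A0 start step (p' ++ [x] ++ z :: w)).set
          (start + (p'.length + 1) * step) x
          = pvScatter A0 start step (p' ++ x :: x :: w) := by
        rw [pvScatter_set step hstep _ (p'.length + 1) A0 start x hlistlen]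
        congr 1
        rw [List.append_assoc, List.set_append_right _ _ (by simp)]
        simp
      rw [hset]
      have := ihp f' x (x :: w) (c + 2) v (by simp at hf; omega) hp'
        (by simp at hlen ⊢; omega)
      rcases this with ⟨h1, h2⟩
      constructor
      · rw [h1, pvInsC_concat_gt v x p' hvx]
        simp
      · rw [h2, pvTle_concat_gt v x p' hvx]
        simp only [List.length_append, List.length_cons, List.length_nil]
        push_cast
        ring
    · -- loop ends: write v right after p' ++ [x]
      rw [harithj, pvShift]
      rw [if_neg (by
        rintro ⟨-, -, hgt⟩
        rw [harithsub, hreadA] at hgt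
        exact hvx hgt)]
      have hallle : ∀ a ∈ p' ++ [x], a ≤ v := by
        intro a ha
        rcases List.mem_append.mp ha with h1 | h2
        · exact le_trans (hax a h1) (by omega)
        · simp at h2; subst h2; omega
      constructor
      · rw [pvScatter_set step hstep _ (p'.length + 1) A0 start v hlistlen]
        rw [pvInsC_of_all_le v _ hallle]
        congr 1
        rw [List.append_assoc, List.set_append_right _ _ (by simp)]
        simp
      · rw [pvTle_of_all_le v _ hallle]
        simp

-- ---- simulation of A's for loop over one gapped subsequence ----

theorem pvJumpFor_sim (A0 : List Int) (start step : Nat) (hstep : 0 < step) (hss : start < step) :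
    ∀ (rest : List Int) (f : Nat) (p : List Int) (c : Int),
    rest.length ≤ f → p ≠ [] → p.Pairwise (· ≤ ·) →
    p.length + rest.length = (pvGather A0 start step).length →
    pvJumpFor f A0.length step (pvScatter A0 start step (p ++ rest)) (start + p.length * step) c
      = (pvScatter A0 start step (pvFold p rest c).1, (pvFold p rest c).2) := by
  intro rest
  induction rest with
  | nil =>
    intro f p c hfuel hne hp hlen
    have hr : pvJumpFor f A0.length step (pvScatter A0 start step (p ++ []))
        (start + p.length * step) c = (pvScatter A0 start step (p ++ []), c) := by
      cases f with
      | zero => rfl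
      | succ f =>
        rw [pvJumpFor]
        rw [if_neg (by
          rintro ⟨-, hlt⟩
          simp only [List.length_nil, Nat.add_zero] at hlen
          rw [hlen] at hlt
          exact pvGather_end A0 start step hstep hlt)]
    rw [hr]
    simp [pvFold]
  | cons v vs ih =>
    intro f p c hfuel hne hp hlen
    have hmlt : p.length < (pvGather A0 start step).length := by simp at hlen; omega
    have hpos : start + p.length * step < A0.length := pvGather_pos A0 start step _ hmlt
    obtain ⟨f', rfl⟩ : ∃ f', f = f' + 1 := ⟨f - 1, by simp at hfuel; omega⟩
    rw [pvJumpFor]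
    rw [if_pos ⟨hstep, hpos⟩]
    have hval : (pvScatter A0 start step (p ++ v :: vs)).getD (start + p.length * step) 0 = v := by
      rw [pvScatter_getD step hstep _ p.length A0 start 0 (by simp) hpos]
      exact pvGetD_append_mid p v vs 0
    simp only [hval]
    have hplef : p.length ≤ start + p.length * step :=
      le_trans (Nat.le_mul_of_pos_right _ hstep) (by omega)
    rcases pvShift_sim A0 start step hstep hss p (start + p.length * step) v vs c v hplef hp
      (by simp at hlen ⊢; omega) with ⟨h1, h2⟩
    rw [h1, h2]
    have harith : start + p.length * step + step = start + (pvInsC v p).length * step := by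
      rw [pvInsC_length, Nat.succ_mul]; omega
    rw [harith]
    rw [ih f' (pvInsC v p) _ (by simp at hfuel; omega) (pvInsC_ne_nil v p)
      (pvInsC_sorted v p hp) (by rw [pvInsC_length]; simp at hlen ⊢; omega)]
    rfl

-- ---- one full gapped pass: A's jump equals the shared model ----

theorem pvJump_eq (A : List Int) (start step : Nat) (hstep : 0 < step) (hss : start < step) :
    pvJump A start step
      = (pvScatter A start step (pvFold [] (pvGather A start step) 0).1,
         (pvFold [] (pvGather A start step) 0).2) := by
  cases hg : pvGather A start step with
  | nil =>
    have hlen : A.length ≤ start := by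
      by_contra hc
      exact pvGather_ne_nil A start step hstep (by omega) hg
    unfold pvJump
    have hr : ∀ f, pvJumpFor f A.length step A (start + step) 0 = (A, 0) := by
      intro f
      cases f with
      | zero => rfl
      | succ f => rw [pvJumpFor, if_neg (by rintro ⟨-, hlt⟩; omega)]
    rw [hr]
    simp [pvFold, pvScatter]
  | cons v t =>
    unfold pvJump
    have htlen : t.length ≤ A.length := by
      have := pvGather_le_length A start step
      rw [hg] at this
      simp at this
      omega
    have hsim := pvJumpFor_sim A start step hstep hss t A.length [v] 0 htlen (by simp)
      (by simp) (by rw [hg]; simp only [List.length_cons, List.length_nil]; omega)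
    have hA : pvScatter A start step ([v] ++ t) = A := by
      conv_rhs => rw [← pvGather_scatter A start step, hg]
      rw [List.singleton_append]
    rw [hA] at hsim
    simp only [List.length_cons, List.length_nil, Nat.zero_add, one_mul] at hsim
    have hfold : pvFold [] (v :: t) 0 = pvFold [v] t 0 := by
      simp [pvFold, pvInsC_nil, pvTle_nil]
    rw [hsim, hfold]

-- ---- the start loops agree ----

theorem pvStartLoop_eq_passB : ∀ (f seg j : Nat) (A : List Int) (c : Int),
    pvStartLoop f seg A j c = pvPassB f seg A j c := by
  intro f
  induction f with
  | zero => intro seg j A c; rfl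
  | succ f ih =>
    intro seg j A c
    by_cases hj : j < seg
    · rw [pvStartLoop, pvPassB, if_pos hj, if_pos hj]
      have hstep : 0 < seg := by omega
      have hpref : pvPrefLoop [] (pvGather A j seg) c
          = ((pvFold [] (pvGather A j seg) 0).1, c + (pvFold [] (pvGather A j seg) 0).2) := by
        rw [pvPrefLoop_eq_fold (pvGather A j seg) [] c List.Pairwise.nil]
        exact pvFold_offset (pvGather A j seg) [] c
      simp only [pvJump_eq A j seg hstep hj, hpref]
      exact ih seg (j + 1) _ _
    · rw [pvStartLoop, pvPassB, if_neg hj, if_neg hj]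

-- ---- the outer gap loops agree ----

theorem pvShellLoop_eq : ∀ (f : Nat) (A : List Int) (seg : Nat) (c : Int),
    pvShellLoop f A seg c = pvShellLoopB f A seg c := by
  intro f
  induction f with
  | zero => intro A seg c; rfl
  | succ f ih =>
    intro A seg c
    by_cases hseg : 0 < seg
    · rw [pvShellLoop, pvShellLoopB, if_pos hseg, if_pos hseg]
      simp only [pvStartLoop_eq_passB seg seg 0 A (c + 1)]
      exact ih _ _ _
    · rw [pvShellLoop, pvShellLoopB, if_neg hseg, if_neg hseg]

-- ===== VERDICT (by name: the statement is the Claim_ definition above) =====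
theorem shellsort_ops_spec : Claim_equal_shellsort_ops := by
  intro A _
  unfold Spec_shellsort_ops shellsort_ops shellsort_ops_alt
  exact pvShellLoop_eq (A.length / 2 + 1) A (A.length / 2) 0
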